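-- pv_equiv track=rewrite | github.com/p-lots/codewars | 7-kyu/max-sum-between-two-negatives/python/solution.py | split_by_neg
-- ===== SOURCE A (Python) =====
-- def split_by_neg(arr):
--     ret = []
--     temp = []
--     found_first_neg = False
--     for n in arr:
--         if n < 0:
--             found_first_neg = True
--             if temp:
--                 ret.append(temp)
--                 temp = []
--         elif n > 0 and found_first_neg:
--             temp.append(n)
--     return ret
-- ===== SOURCE B (Python) =====
-- def split_by_neg(arr):
--     n = len(arr)
--     i = 0
--     while i < n and arr[i] >= 0:
--         i += 1
--     if i >= n:
--         return []
--     i += 1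
--     out = []
--     while True:
--         group = []
--         while i < n and arr[i] >= 0:
--             if arr[i] > 0:
--                 group.append(arr[i])
--             i += 1
--         if i >= n:
--             return out
--         i += 1
--         if group:
--             out.append(group)
-- ===== Notes on version B (the rewrite author's own statement) =====
-- stated objective: alternative
-- what changed: Replaces A's per-element state machine (a found-flag plus pending buffer threaded through one fold) with an index-cursor segment scan: skip past the first negative, then repeatedly collect one positive-filtered segment up to the next negative and emit it if non-empty.
import Mathlib
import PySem

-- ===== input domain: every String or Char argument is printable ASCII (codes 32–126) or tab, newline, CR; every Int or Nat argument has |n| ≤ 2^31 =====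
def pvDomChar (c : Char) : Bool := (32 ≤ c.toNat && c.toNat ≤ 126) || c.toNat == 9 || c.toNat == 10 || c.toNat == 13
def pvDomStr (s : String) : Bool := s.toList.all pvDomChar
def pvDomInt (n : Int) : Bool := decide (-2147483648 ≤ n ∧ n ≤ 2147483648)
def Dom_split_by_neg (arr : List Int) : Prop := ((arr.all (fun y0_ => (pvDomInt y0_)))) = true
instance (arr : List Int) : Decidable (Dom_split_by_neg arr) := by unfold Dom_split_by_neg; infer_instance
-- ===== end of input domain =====

-- B replaces A's found-flag/pending-buffer fold by an index-cursor segment scan; same O(n) cost (objective: alternative).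

-- ===== PORT A =====
-- A's loop body, acting on the state (ret, temp, found_first_neg)
def stepA (s : List (List Int) × List Int × Bool) (n : Int) :
    List (List Int) × List Int × Bool :=
  if n < 0 then
    ((if s.2.1 ≠ [] then s.1 ++ [s.2.1] else s.1), ([] : List Int), true)
  else if 0 < n ∧ s.2.2 = true then
    (s.1, s.2.1 ++ [n], s.2.2)
  else s

def split_by_neg (arr : List Int) : List (List Int) :=
  (arr.foldl stepA ([], [], false)).1

-- ===== PORT B =====
-- B's first loop: 'while i < n and arr[i] >= 0: i += 1' (skip to the first negative)
def altSkip (arr : List Int) (i : Nat) : Nat :=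
  if h : i < arr.length then
    if arr[i] ≥ 0 then altSkip arr (i + 1) else i
  else i
termination_by arr.length - i

-- B's inner loop: collect the current group of positives, stop at a negative or the end
def altInner (arr : List Int) (i : Nat) (group : List Int) : List Int × Nat :=
  if h : i < arr.length then
    if arr[i] ≥ 0 then
      altInner arr (i + 1) (if arr[i] > 0 then group ++ [arr[i]] else group)
    else (group, i)
  else (group, i)
termination_by arr.length - i

-- bound needed for altOuter's termination (cited by its decreasing_by)
theorem altInner_bounds (arr : List Int) (i : Nat) (group : List Int) :
    i ≤ (altInner arr i group).2 ∧ (altInner arr i group).2 ≤ max i arr.length := by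
  fun_induction altInner arr i group with
  | case1 i group h hge ih => simp only [dite_eq_ite] at ih ⊢; omega
  | case2 i group h hge => simp
  | case3 i group h => simp

-- B's outer 'while True' loop, carrying out
def altOuter (arr : List Int) (i : Nat) (out : List (List Int)) : List (List Int) :=
  if arr.length ≤ (altInner arr i []).2 then out
  else altOuter arr ((altInner arr i []).2 + 1)
    (if (altInner arr i []).1 ≠ [] then out ++ [(altInner arr i []).1] else out)
termination_by arr.length - i
decreasing_by
  have := altInner_bounds arr i []
  omega

def split_by_neg_alt (arr : List Int) : List (List Int) :=
  let i := altSkip arr 0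
  if arr.length ≤ i then [] else altOuter arr (i + 1) []

-- ===== PRECONDITION & SPEC =====
def Spec_split_by_neg (arr : List Int) (out : List (List Int)) : Prop := out = split_by_neg_alt arr
instance (arr : List Int) (out : List (List Int)) : Decidable (Spec_split_by_neg arr out) := by unfold Spec_split_by_neg; infer_instance

-- ===== CLAIM (what is proved, stated in full; the proofs are below) =====
def Claim_equal_split_by_neg : Prop := ∀ (arr : List Int), Dom_split_by_neg arr → Spec_split_by_neg arr (split_by_neg arr)

-- ===== LEMMAS AND PROOFS =====

theorem stepA_neg (out : List (List Int)) (g : List Int) (b : Bool) (n : Int) (h : n < 0) :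
    stepA (out, g, b) n = ((if g ≠ [] then out ++ [g] else out), [], true) := by
  simp [stepA, h]

theorem stepA_nonneg_true (out : List (List Int)) (g : List Int) (n : Int) (h : ¬ n < 0) :
    stepA (out, g, true) n = (out, if 0 < n then g ++ [n] else g, true) := by
  by_cases hp : 0 < n <;> simp [stepA, h, hp]

theorem stepA_nonneg_false (out : List (List Int)) (n : Int) (h : ¬ n < 0) :
    stepA (out, [], false) n = (out, [], false) := by
  simp [stepA, h]

-- altInner replays exactly A's non-negative steps while found_first_neg = true
theorem altInner_fold (arr : List Int) (i : Nat) (group : List Int) (out : List (List Int)) :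
    List.foldl stepA (out, group, true) (arr.drop i) =
      List.foldl stepA (out, (altInner arr i group).1, true)
        (arr.drop ((altInner arr i group).2)) := by
  fun_induction altInner arr i group with
  | case1 i group h hge ih =>
    rw [List.drop_eq_getElem_cons h, List.foldl_cons,
        stepA_nonneg_true out group arr[i] (by omega)]
    simp only [dite_eq_ite] at ih ⊢
    simpa using ih
  | case2 i group h hge => rfl
  | case3 i group h => rfl

-- altInner stops at the end of the list or at a negative element
theorem altInner_stop (arr : List Int) (i : Nat) (group : List Int) :
    arr.length ≤ (altInner arr i group).2 ∨ arr.getD (altInner arr i group).2 0 < 0 := by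
  fun_induction altInner arr i group with
  | case1 i group h hge ih => simp only [dite_eq_ite] at ih ⊢; exact ih
  | case2 i group h hge =>
    right; simpa [List.getD_eq_getElem?_getD, List.getElem?_eq_getElem h] using (by omega : arr[i] < 0)
  | case3 i group h => left; simpa using by omega

-- A's fold from a found state equals B's outer loop
theorem altOuter_fold (arr : List Int) : ∀ k i out, arr.length - i = k → i ≤ arr.length →
    (List.foldl stepA (out, [], true) (arr.drop i)).1 = altOuter arr i out := by
  intro k
  induction k using Nat.strong_induction_on with
  | _ k ih =>
    intro i out hk hi
    rw [altOuter.eq_def]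
    have hb := altInner_bounds arr i []
    have hs := altInner_stop arr i []
    have hf := altInner_fold arr i [] out
    by_cases hend : arr.length ≤ (altInner arr i []).2
    · simp only [hend, if_pos]
      rw [hf, List.drop_eq_nil_of_le hend]
      rfl
    · have hlt : (altInner arr i []).2 < arr.length := by omega
      have hneg : arr[(altInner arr i []).2] < 0 := by
        rcases hs with hs | hs
        · omega
        · simpa [List.getD_eq_getElem?_getD, List.getElem?_eq_getElem hlt] using hs
      simp only [hend, if_false]
      rw [hf, List.drop_eq_getElem_cons hlt, List.foldl_cons,
          stepA_neg out (altInner arr i []).1 true _ hneg]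
      exact ih (arr.length - ((altInner arr i []).2 + 1)) (by omega) _ _ rfl (by omega)

-- before the first negative, A's fold leaves its state unchanged
theorem altSkip_fold (arr : List Int) (i : Nat) (out : List (List Int)) :
    List.foldl stepA (out, [], false) (arr.drop i) =
      List.foldl stepA (out, [], false) (arr.drop (altSkip arr i)) := by
  fun_induction altSkip arr i with
  | case1 i h hge ih =>
    rw [List.drop_eq_getElem_cons h, List.foldl_cons, stepA_nonneg_false out arr[i] (by omega)]
    exact ih
  | case2 i h hge => rfl
  | case3 i h => rfl

theorem altSkip_bounds (arr : List Int) (i : Nat) :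
    i ≤ altSkip arr i ∧ altSkip arr i ≤ max i arr.length := by
  fun_induction altSkip arr i with
  | case1 i h hge ih => omega
  | case2 i h hge => simp
  | case3 i h => simp

theorem altSkip_stop (arr : List Int) (i : Nat) :
    arr.length ≤ altSkip arr i ∨ arr.getD (altSkip arr i) 0 < 0 := by
  fun_induction altSkip arr i with
  | case1 i h hge ih => exact ih
  | case2 i h hge =>
    right; simpa [List.getD_eq_getElem?_getD, List.getElem?_eq_getElem h] using (by omega : arr[i] < 0)
  | case3 i h => left; omega

-- ===== VERDICT (by name: the statement is the Claim_ definition above) =====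
theorem split_by_neg_spec : Claim_equal_split_by_neg := by
  intro arr _
  unfold Spec_split_by_neg split_by_neg split_by_neg_alt
  have h0 : arr = arr.drop 0 := rfl
  have hb := altSkip_bounds arr 0
  have hs := altSkip_stop arr 0
  by_cases hend : arr.length ≤ altSkip arr 0
  · simp only [hend, if_pos]
    conv_lhs => rw [h0, altSkip_fold arr 0 [], List.drop_eq_nil_of_le hend]
    rfl
  · have hlt : altSkip arr 0 < arr.length := by omega
    have hneg : arr[altSkip arr 0] < 0 := by
      rcases hs with hs | hs
      · omega
      · simpa [List.getD_eq_getElem?_getD, List.getElem?_eq_getElem hlt] using hs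
    simp only [hend, if_false]
    conv_lhs => rw [h0, altSkip_fold arr 0 [], List.drop_eq_getElem_cons hlt, List.foldl_cons,
      stepA_neg [] [] false _ hneg]
    simp only [ne_eq, not_true_eq_false, if_false]
    exact altOuter_fold arr (arr.length - (altSkip arr 0 + 1)) (altSkip arr 0 + 1) [] rfl (by omega)
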